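-- pv_equiv track=rewrite | github.com/UnrequitedEcho/Advent-of-Code-2024 | day15/day15.py | process_ahead
-- ===== SOURCE A (Python) =====
-- def process_ahead(ahead):
-- 	try:
-- 		spaceIndex = ahead.index(".")
-- 	except ValueError:
-- 		return None
-- 	for char in ahead[:spaceIndex]:
-- 		if char == "#":
-- 			return None
-- 	for i, char in enumerate(ahead[:spaceIndex+1]):
-- 		ahead[i] = "O"
-- 	ahead[0] = "."
-- 	return ahead
-- ===== SOURCE B (Python) =====
-- def process_ahead(ahead):
-- 	# Single fused scan: stop at the first "#" (blocked) or the first "."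
-- 	# (free space); on success overwrite the prefix in one slice assignment
-- 	# and return the same (mutated) list object, as the original does.
-- 	for i, char in enumerate(ahead):
-- 		if char == "#":
-- 			return None
-- 		if char == ".":
-- 			ahead[:i + 1] = ["."] + ["O"] * i
-- 			return ahead
-- 	return None
-- ===== Notes on version B (the rewrite author's own statement) =====
-- stated objective: alternative
-- what changed: The separate index('.') lookup, the second prefix scan for '#', and the element-by-element fill loop are fused into one forward scan that stops at the first '#' or '.', followed by a single slice assignment writing the new prefix.
import Mathlib
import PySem

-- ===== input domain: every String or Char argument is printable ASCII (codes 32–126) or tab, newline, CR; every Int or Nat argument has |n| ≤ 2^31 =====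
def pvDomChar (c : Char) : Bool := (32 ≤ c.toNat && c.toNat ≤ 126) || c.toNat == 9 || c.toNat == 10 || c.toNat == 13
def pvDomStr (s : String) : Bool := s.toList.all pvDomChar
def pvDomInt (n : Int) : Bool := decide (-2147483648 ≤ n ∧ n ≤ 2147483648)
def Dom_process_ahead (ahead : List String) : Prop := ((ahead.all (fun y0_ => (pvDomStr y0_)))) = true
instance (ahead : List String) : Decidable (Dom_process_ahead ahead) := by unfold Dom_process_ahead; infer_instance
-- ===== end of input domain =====

-- B fuses A's index('.') lookup, prefix '#'-scan and fill loop into one forward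
-- scan plus a single slice assignment (alternative decomposition, same result).
-- Both Pythons mutate `ahead` in place and return the same object; the
-- equivalence proved here is about the RETURN value.

-- ===== PORT A =====
def process_ahead (ahead : List String) : Option (List String) :=
  match PySem.List.index? ahead "." with
  | none => none                     -- except ValueError: return None
  | some spaceIndex =>
    -- for char in ahead[:spaceIndex]: if char == "#": return None
    if (PySem.List.slice ahead none (some (spaceIndex : Int))).any (fun c => c == "#") then
      none
    else
      -- for i, char in enumerate(ahead[:spaceIndex+1]): ahead[i] = "O"
      let filled :=
        (PySem.List.enumerate (PySem.List.slice ahead none (some ((spaceIndex : Int) + 1)))).foldl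
          (fun acc p => PySem.List.pySetD acc p.1 "O") ahead
      -- ahead[0] = "."
      some (PySem.List.pySetD filled 0 ".")

-- ===== PORT B =====
-- the fused scan of Source B: first "#" → None, first "." → its index
def altScan : List String → Option Nat
  | [] => none
  | c :: rest =>
    if c == "#" then none
    else if c == "." then some 0
    else (altScan rest).map (· + 1)

def process_ahead_alt (ahead : List String) : Option (List String) :=
  match altScan ahead with
  | none => none
  | some i =>
    -- ahead[:i+1] = ["."] + ["O"] * i
    some ("." :: (List.replicate i "O" ++ ahead.drop (i + 1)))

-- ===== PRECONDITION & SPEC =====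
def Spec_process_ahead (ahead : List String) (out : Option (List String)) : Prop := out = process_ahead_alt ahead
instance (ahead : List String) (out : Option (List String)) : Decidable (Spec_process_ahead ahead out) := by unfold Spec_process_ahead; infer_instance

-- ===== CLAIM (what is proved, stated in full; the proofs are below) =====
def Claim_equal_process_ahead : Prop := ∀ (ahead : List String), Dom_process_ahead ahead → Spec_process_ahead ahead (process_ahead ahead)

-- ===== LEMMAS AND PROOFS =====

-- the fused scan equals "first '.' index, unless a '#' precedes it"
theorem altScan_eq (l : List String) :
    altScan l = match PySem.List.index? l "." with
      | none => none
      | some i => if (l.take i).any (fun c => c == "#") then none else some i := by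
  induction l with
  | nil => simp [altScan, PySem.List.index?]
  | cons c rest ih =>
    by_cases hdot : c = "."
    · subst hdot
      rw [PySem.List.index?_cons_self]
      simp [altScan]
    · rw [PySem.List.index?_cons_of_ne rest hdot]
      by_cases hhash : c = "#"
      · subst hhash
        cases h : PySem.List.index? rest "." with
        | none => simp [altScan]
        | some i => simp [altScan]
      · simp only [altScan, ih]
        cases h : PySem.List.index? rest "." with
        | none => simp [hdot, hhash]
        | some i =>
          by_cases hm : "#" ∈ List.take i rest <;>
            simp [hdot, hhash, hm, List.any_cons]

-- A's fill loop writes "O" at positions 0..n-1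
theorem fill_loop (l : List String) (n : Nat) (hn : n ≤ l.length) :
    (PySem.List.enumerate (l.take n)).foldl (fun acc p => PySem.List.pySetD acc p.1 "O") l
      = List.replicate n "O" ++ l.drop n := by
  induction n with
  | zero => simp
  | succ n ih =>
    have hn' : n < l.length := hn
    have htake : l.take (n + 1) = l.take n ++ [l[n]] := by
      rw [List.take_add_one]
      simp [List.getElem?_eq_getElem hn']
    rw [htake, PySem.List.enumerate_append, List.foldl_append, ih (le_of_lt hn')]
    have hlen : (l.take n).length = n := List.length_take_of_le (le_of_lt hn')
    simp only [PySem.List.enumerate, hlen, List.foldl_cons, List.foldl_nil,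
      zero_add, PySem.List.pySetD_natCast]
    have hset : (List.replicate n "O" ++ l.drop n).set n "O"
        = List.replicate (n + 1) "O" ++ l.drop (n + 1) := by
      rw [List.set_append_right _ _ (by simp)]
      simp only [List.length_replicate, Nat.sub_self]
      rw [List.drop_eq_getElem_cons hn', List.set_cons_zero, List.replicate_succ' (n := n)]
      simp
    simpa using hset

-- ===== VERDICT (by name: the statement is the Claim_ definition above) =====
theorem process_ahead_spec : Claim_equal_process_ahead := by
  intro ahead _
  unfold Spec_process_ahead process_ahead process_ahead_alt
  rw [altScan_eq]
  cases hidx : PySem.List.index? ahead "." with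
  | none => rfl
  | some i =>
    obtain ⟨hi, -, -⟩ := PySem.List.getElem_of_index?_eq_some hidx
    have hslice1 : PySem.List.slice ahead none (some (i : Int)) = ahead.take i :=
      PySem.List.slice_to_natCast ahead i
    have hslice2 : PySem.List.slice ahead none (some ((i : Int) + 1)) = ahead.take (i + 1) := by
      have := PySem.List.slice_to_natCast ahead (i + 1)
      simpa [Nat.cast_add] using this
    dsimp only
    rw [hslice1, hslice2]
    by_cases hb : (ahead.take i).any (fun c => c == "#") = true
    · rw [if_pos hb, if_pos hb]
    · rw [if_neg hb, if_neg hb]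
      dsimp only
      rw [fill_loop ahead (i + 1) hi,
        PySem.List.pySetD_of_nonneg _ _ (by norm_num)]
      simp [List.replicate_succ]
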